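-- pv_equiv track=rewrite | github.com/michaelaredman/adventofcode2023 | day18pt2.py | instructions_to_coordinates
-- ===== SOURCE A (Python) =====
-- d_to_dir = {'L': (0, -1), 'R': (0, 1), 'U': (-1, 0), 'D': (1, 0)}
--
-- def instructions_to_coordinates(instructions: list[tuple[str, int]]):
--     coords = [(0, 0)]
--     p = (0, 0)
--     for d, l in instructions:
--         dir = d_to_dir[d]
--         p = (p[0] + dir[0]*l, p[1] + dir[1]*l)
--         coords.append(p)
--     return coords
-- ===== SOURCE B (Python) =====
-- d_to_dir = {'L': (0, -1), 'R': (0, 1), 'U': (-1, 0), 'D': (1, 0)}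
--
-- def instructions_to_coordinates(instructions: list[tuple[str, int]]):
--     def go(x, y, rest):
--         if not rest:
--             return [(x, y)]
--         d, l = rest[0]
--         dx, dy = d_to_dir[d]
--         return [(x, y)] + go(x + dx * l, y + dy * l, rest[1:])
--     return go(0, 0, instructions)
-- ===== Notes on version B (the rewrite author's own statement) =====
-- stated objective: alternative
-- what changed: Replaces A's single mutating loop (append to a coords list while updating a current point) by a recursive front-to-back construction: each call emits the current vertex as the list head and recurses on the rest with the updated position.
import Mathlib
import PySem

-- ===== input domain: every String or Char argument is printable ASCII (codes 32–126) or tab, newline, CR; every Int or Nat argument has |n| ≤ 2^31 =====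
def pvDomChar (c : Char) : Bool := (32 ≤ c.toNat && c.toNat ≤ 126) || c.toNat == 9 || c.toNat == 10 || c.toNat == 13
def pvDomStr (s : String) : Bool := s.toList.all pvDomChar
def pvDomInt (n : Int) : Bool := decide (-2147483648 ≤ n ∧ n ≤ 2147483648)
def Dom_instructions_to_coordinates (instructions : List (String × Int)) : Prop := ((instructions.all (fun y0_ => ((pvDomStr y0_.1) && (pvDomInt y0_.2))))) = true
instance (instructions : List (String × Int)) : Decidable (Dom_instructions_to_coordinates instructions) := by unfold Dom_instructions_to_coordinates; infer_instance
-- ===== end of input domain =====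

-- B rebuilds the vertex list by structural recursion (head = current vertex) instead of A's
-- append-to-accumulator loop; same O(n) cost, different decomposition (objective: alternative).

-- ===== PORT A =====
-- d_to_dir lookup; none = KeyError (excluded by Pre_); getD (0,0) is only a totaliser outside Pre_
def d_to_dir (d : String) : Option (Int × Int) :=
  if d = "L" then some (0, -1)
  else if d = "R" then some (0, 1)
  else if d = "U" then some (-1, 0)
  else if d = "D" then some (1, 0)
  else none

def instructions_to_coordinates (instructions : List (String × Int)) : List (Int × Int) :=
  (instructions.foldl
    (fun (st : List (Int × Int) × (Int × Int)) dl =>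
      let dir := (d_to_dir dl.1).getD (0, 0)
      let p := (st.2.1 + dir.1 * dl.2, st.2.2 + dir.2 * dl.2)
      (st.1 ++ [p], p))
    ([(0, 0)], (0, 0))).1

-- ===== PORT B =====
def goB (x y : Int) (rest : List (String × Int)) : List (Int × Int) :=
  match rest with
  | [] => [(x, y)]
  | (d, l) :: rest =>
    let dir := (d_to_dir d).getD (0, 0)
    (x, y) :: goB (x + dir.1 * l) (y + dir.2 * l) rest

def instructions_to_coordinates_alt (instructions : List (String × Int)) : List (Int × Int) :=
  goB 0 0 instructions

-- ===== PRECONDITION & SPEC =====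
-- Pre_ excludes exactly the inputs where the Python A raises KeyError (a direction not in d_to_dir).
def Pre_instructions_to_coordinates (instructions : List (String × Int)) : Prop :=
  ∀ p ∈ instructions, p.1 = "L" ∨ p.1 = "R" ∨ p.1 = "U" ∨ p.1 = "D"
instance (instructions : List (String × Int)) : Decidable (Pre_instructions_to_coordinates instructions) := by
  unfold Pre_instructions_to_coordinates; infer_instance

def pvWitness_instructions_to_coordinates : (List (String × Int)) := [("R", 2), ("D", 3)]

def Spec_instructions_to_coordinates (instructions : List (String × Int)) (out : List (Int × Int)) : Prop :=
  out = instructions_to_coordinates_alt instructions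
instance (instructions : List (String × Int)) (out : List (Int × Int)) : Decidable (Spec_instructions_to_coordinates instructions out) := by
  unfold Spec_instructions_to_coordinates; infer_instance

-- ===== CLAIM (what is proved, stated in full; the proofs are below) =====
def Claim_equal_instructions_to_coordinates : Prop := ∀ (instructions : List (String × Int)), Dom_instructions_to_coordinates instructions → Pre_instructions_to_coordinates instructions → Spec_instructions_to_coordinates instructions (instructions_to_coordinates instructions)

-- ===== LEMMAS AND PROOFS =====

theorem goB_head (x y : Int) (rest : List (String × Int)) :
    goB x y rest = (x, y) :: (goB x y rest).tail := by
  cases rest with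
  | nil => simp [goB]
  | cons hd tl => obtain ⟨d, l⟩ := hd; simp [goB]

-- Loop invariant: the fold's accumulator equals acc followed by the tail of B's recursion.
theorem fold_eq_goB (rest : List (String × Int)) :
    ∀ (acc : List (Int × Int)) (x y : Int),
      (rest.foldl
        (fun (st : List (Int × Int) × (Int × Int)) dl =>
          let dir := (d_to_dir dl.1).getD (0, 0)
          let p := (st.2.1 + dir.1 * dl.2, st.2.2 + dir.2 * dl.2)
          (st.1 ++ [p], p))
        (acc, (x, y))).1 = acc ++ (goB x y rest).tail := by
  induction rest with
  | nil => intro acc x y; simp [goB]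
  | cons hd tl ih =>
      intro acc x y
      obtain ⟨d, l⟩ := hd
      simp only [List.foldl_cons, goB]
      rw [ih]
      simp
      exact (goB_head _ _ _).symm

-- ===== VERDICT (by name: the statement is the Claim_ definition above) =====
theorem instructions_to_coordinates_spec : Claim_equal_instructions_to_coordinates := by
  intro instructions _ _
  unfold Spec_instructions_to_coordinates instructions_to_coordinates instructions_to_coordinates_alt
  rw [fold_eq_goB]
  exact (goB_head 0 0 instructions).symm
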